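-- pv_equiv track=rewrite | github.com/lilypond/lilypond | python/book_base.py | find_linestarts
-- ===== SOURCE A (Python) =====
-- def find_linestarts(s):
--     """Return a list of indices indicating the first char of a line."""
--     nls = [0]
--     start = 0
--     end = len(s)
--     while True:
--         i = s.find('\n', start)
--         if i < 0:
--             break
--
--         i = i + 1
--         nls.append(i)
--         start = i
--
--     nls.append(len(s))
--     return nls
-- ===== SOURCE B (Python) =====
-- def find_linestarts(s):
--     """Return a list of indices indicating the first char of a line."""
--     return [0] + [i + 1 for i, c in enumerate(s) if c == '\n'] + [len(s)]
-- ===== Notes on version B (the rewrite author's own statement) =====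
-- stated objective: simpler
-- what changed: Replaces the while-loop of repeated str.find calls (searching for the next newline from a moving start) with a single list comprehension over enumerate(s) collecting i+1 for each newline character.
import Mathlib
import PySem

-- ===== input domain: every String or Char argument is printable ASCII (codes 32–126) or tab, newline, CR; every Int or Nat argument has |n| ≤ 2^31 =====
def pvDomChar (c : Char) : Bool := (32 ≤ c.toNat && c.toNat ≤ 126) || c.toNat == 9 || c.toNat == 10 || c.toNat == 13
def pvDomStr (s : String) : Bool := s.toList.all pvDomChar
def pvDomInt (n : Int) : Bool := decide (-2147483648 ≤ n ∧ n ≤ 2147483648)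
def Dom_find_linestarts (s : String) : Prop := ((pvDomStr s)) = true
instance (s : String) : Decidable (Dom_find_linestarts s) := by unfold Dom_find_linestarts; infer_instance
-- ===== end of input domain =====

-- B replaces the while-loop of repeated str.find calls by a single
-- comprehension over enumerate(s) collecting i+1 for each newline (objective: simpler).

-- ===== PORT A =====
-- A's 'while True' loop: state is (start, nls); fuel only makes the recursion total
-- (the loop always terminates: each found index strictly increases start).
def findA_loop (cs : List Char) : Nat → Int → List Int → List Int
  | 0, _, nls => nls
  | fuel+1, start, nls =>
    let i := PySem.Chars.findFrom cs ['\n'] start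
    if i < 0 then nls
    else findA_loop cs fuel (i+1) (nls ++ [i+1])

def find_linestarts (s : String) : List Int :=
  findA_loop s.toList (s.toList.length + 1) 0 [0] ++ [PySem.Str.len s]

-- ===== PORT B =====
def find_linestarts_alt (s : String) : List Int :=
  [0] ++ ((PySem.List.enumerate s.toList 0).filter (fun p => p.2 == '\n')).map (fun p => p.1 + 1)
      ++ [PySem.Str.len s]

-- ===== PRECONDITION & SPEC =====
def Spec_find_linestarts (s : String) (out : List Int) : Prop := out = find_linestarts_alt s
instance (s : String) (out : List Int) : Decidable (Spec_find_linestarts s out) := by unfold Spec_find_linestarts; infer_instance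

-- ===== CLAIM (what is proved, stated in full; the proofs are below) =====
def Claim_equal_find_linestarts : Prop := ∀ (s : String), Dom_find_linestarts s → Spec_find_linestarts s (find_linestarts s)

-- ===== LEMMAS AND PROOFS =====

-- reference: the indices one past each newline of cs, when cs starts at index p
def nlpos (cs : List Char) (p : Int) : List Int :=
  match cs with
  | [] => []
  | c :: rest => if c = '\n' then (p+1) :: nlpos rest (p+1) else nlpos rest (p+1)

theorem nlpos_eq_enum (cs : List Char) (p : Int) :
    ((PySem.List.enumerate cs p).filter (fun q => q.2 == '\n')).map (fun q => q.1 + 1)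
      = nlpos cs p := by
  induction cs generalizing p with
  | nil => simp [nlpos, PySem.List.enumerate_nil]
  | cons c rest ih =>
    simp only [PySem.List.enumerate_cons, List.filter_cons, nlpos]
    by_cases h : c = '\n' <;> simp [h, ih]

theorem nlpos_nil_of_no_nl (cs : List Char) (p : Int) (h : '\n' ∉ cs) : nlpos cs p = [] := by
  induction cs generalizing p with
  | nil => rfl
  | cons c rest ih =>
    simp only [List.mem_cons, not_or] at h
    simp only [nlpos]
    rw [if_neg (Ne.symm h.1)]
    exact ih _ h.2

theorem singleton_prefix_drop {l : List Char} {m : Nat} :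
    ['\n'] <+: l.drop m ↔ l[m]? = some '\n' := by
  have h0 : l[m]? = (l.drop m)[0]? := by rw [List.getElem?_drop]; norm_num
  rw [h0]
  cases hd : l.drop m with
  | nil => simp
  | cons a t => simp [List.cons_prefix_cons, eq_comm]

theorem nlpos_of_first_nl (cs : List Char) (p : Int) (j : Nat)
    (hmin : ∀ i < j, ¬ (['\n'] <+: cs.drop i)) (hget : cs[j]? = some '\n') :
    nlpos cs p = (p + j + 1) :: nlpos (cs.drop (j+1)) (p + j + 1) := by
  induction cs generalizing p j with
  | nil => simp at hget
  | cons c rest ih =>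
    cases j with
    | zero =>
      simp at hget
      simp [nlpos, hget]
    | succ j' =>
      have hc : c ≠ '\n' := by
        intro hc
        exact hmin 0 (by omega) ⟨rest, by simp [hc]⟩
      have hmin' : ∀ i < j', ¬ (['\n'] <+: rest.drop i) := by
        intro i hi
        have := hmin (i+1) (by omega)
        simpa using this
      have hget' : rest[j']? = some '\n' := by simpa using hget
      have hc2 : (p + ((j'+1 : Nat) : Int) + 1) = (p+1) + (j' : Int) + 1 := by push_cast; ring
      rw [List.drop_succ_cons, hc2]
      simp only [nlpos]
      rw [if_neg hc]
      exact ih (p+1) j' hmin' hget'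

theorem findA_loop_eq (cs : List Char) (fuel start : Nat) (nls : List Int)
    (hs : start ≤ cs.length) (hf : cs.length - start < fuel) :
    findA_loop cs fuel (start : Int) nls = nls ++ nlpos (cs.drop start) (start : Int) := by
  induction fuel generalizing start nls with
  | zero => omega
  | succ fuel ih =>
    rw [findA_loop]
    rw [PySem.Chars.findFrom_natCast cs ['\n'] start hs]
    by_cases h : PySem.Chars.find (cs.drop start) ['\n'] = -1
    · rw [if_pos h, if_pos (by norm_num)]
      rw [PySem.Chars.find_eq_neg_one_iff] at h
      have hnm : '\n' ∉ cs.drop start := by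
        intro hm
        obtain ⟨s1, s2, hsplit⟩ := List.append_of_mem hm
        exact h ⟨s1, s2, by simp [hsplit]⟩
      rw [nlpos_nil_of_no_nl _ _ hnm, List.append_nil]
    · rw [if_neg h]
      have hge : 0 ≤ PySem.Chars.find (cs.drop start) ['\n'] := by
        have := PySem.Chars.neg_one_le_find (cs.drop start) ['\n']
        omega
      set jZ := PySem.Chars.find (cs.drop start) ['\n'] with hjZ
      have hlt0 : ¬ ((start : Int) + jZ < 0) := by omega
      rw [if_neg hlt0]
      obtain ⟨hpre, hminpre⟩ := PySem.Chars.find_spec (s := cs.drop start) (sub := ['\n']) hge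
      set j := jZ.toNat with hj
      have hjcast : (j : Int) = jZ := Int.toNat_of_nonneg hge
      have hget : cs[start + j]? = some '\n' := by
        rw [← singleton_prefix_drop]
        rw [List.drop_drop] at hpre
        exact hpre
      have hjlen : start + j < cs.length := by
        rcases List.getElem?_eq_some_iff.mp hget with ⟨hh, -⟩
        exact hh
      have hmin : ∀ i < j, ¬ (['\n'] <+: (cs.drop start).drop i) := hminpre
      have harith : (start : Int) + jZ + 1 = ((start + j + 1 : Nat) : Int) := by
        push_cast; omega
      rw [harith, ih (start + j + 1) (nls ++ [((start + j + 1 : Nat) : Int)]) (by omega) (by omega)]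
      rw [nlpos_of_first_nl (cs.drop start) (start : Int) j hmin
            (by rw [List.getElem?_drop]; exact hget)]
      have e1 : ((start + j + 1 : Nat) : Int) = (start : Int) + (j : Int) + 1 := by push_cast; ring
      have e2 : start + (j + 1) = start + j + 1 := by omega
      rw [List.drop_drop, List.append_assoc, e2, e1]
      rfl

-- ===== VERDICT (by name: the statement is the Claim_ definition above) =====
theorem find_linestarts_spec : Claim_equal_find_linestarts := by
  intro s _
  unfold Spec_find_linestarts find_linestarts find_linestarts_alt
  have h := findA_loop_eq s.toList (s.toList.length + 1) 0 [0] (by omega) (by omega)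
  simp only [Nat.cast_zero, List.drop_zero] at h
  rw [h, ← nlpos_eq_enum]
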